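-- pv_equiv track=rewrite | github.com/SK0LX/test_by_to4ka | run2.py | bfs_from_gateways
-- ===== SOURCE A (Python) =====
-- from collections import deque
--
-- def bfs_from_gateways(graph, targets):
--     queue = deque()
--     visited = {}
--     for target in targets:
--         queue.append((target, target))
--         visited[target] = (0, target)
--     answer = set()
--     while queue:
--         current, source_target = queue.popleft()
--         current_distance, _ = visited[current]
--         for neighbor in graph.get(current, []):
--             if neighbor in targets and current not in targets:
--                 answer.add(f"{neighbor}-{current}")
--             elif neighbor not in visited and neighbor not in targets:
--                 visited[neighbor] = (current_distance + 1, source_target)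
--                 queue.append((neighbor, source_target))
--             if current in targets and neighbor not in targets:
--                 answer.add(f"{current}-{neighbor}")
--     return sorted(list(answer))
-- ===== SOURCE B (Python) =====
-- def bfs_from_gateways(graph, targets):
--     # Pass 1: region = set of non-target nodes reachable from the targets
--     # (targets act as sources; paths go through non-target nodes only).
--     tset = set(targets)
--     region = set()
--     frontier = set(targets)
--     while frontier:
--         nxt = set()
--         for u in frontier:
--             for v in graph.get(u, []):
--                 if v not in tset and v not in region:
--                     nxt.add(v)
--         region |= nxt
--         frontier = nxt
--     # Pass 2: collect edge labels from the adjacency lists.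
--     answer = set()
--     for node in graph:
--         for n in graph.get(node, []):
--             if node in tset and n not in tset:
--                 answer.add(f"{node}-{n}")
--             if node in region and n in tset:
--                 answer.add(f"{n}-{node}")
--     return sorted(answer)
-- ===== Notes on version B (the rewrite author's own statement) =====
-- stated objective: simpler
-- what changed: A's single interleaved BFS (a deque of (node, source) pairs with distances, collecting edge labels inside the expansion loop) is split into two separate passes: a frontier BFS that only computes the set of reachable non-target nodes, then a scan over the adjacency lists that collects the edge labels; set-based target membership replaces A's repeated 'in targets' list scans.
import Mathlib
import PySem

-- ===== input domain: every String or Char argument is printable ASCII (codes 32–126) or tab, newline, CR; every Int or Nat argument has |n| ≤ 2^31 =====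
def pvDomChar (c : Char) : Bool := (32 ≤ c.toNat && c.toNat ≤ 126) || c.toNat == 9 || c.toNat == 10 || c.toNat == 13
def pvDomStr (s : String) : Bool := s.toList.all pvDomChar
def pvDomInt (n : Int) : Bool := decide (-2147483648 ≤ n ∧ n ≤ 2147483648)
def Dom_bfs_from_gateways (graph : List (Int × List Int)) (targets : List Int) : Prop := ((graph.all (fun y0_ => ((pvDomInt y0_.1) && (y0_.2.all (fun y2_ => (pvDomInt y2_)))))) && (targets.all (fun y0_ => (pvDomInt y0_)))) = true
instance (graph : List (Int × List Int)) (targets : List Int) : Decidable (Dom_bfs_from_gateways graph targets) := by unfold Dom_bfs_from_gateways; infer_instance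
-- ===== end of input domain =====

-- B replaces A's single interleaved BFS (queue of (node, source) pairs with distances and
-- edge collection inside the loop) by two separate passes: a frontier BFS computing only the
-- reachable non-target region, then a scan of the adjacency lists collecting the edge labels.
-- Objective: simpler decomposition; same results.

-- ===== PORT A =====

-- f"{a}-{b}" = str(a) + "-" + str(b); exact: PySem.Int.toChars is str() on ints
def edgeStr (a b : Int) : String := String.ofList (PySem.Int.toChars a ++ '-' :: PySem.Int.toChars b)

-- the body of A's 'for neighbor in graph.get(current, [])' loop (if / elif / if)
def aBody (targets : List Int) (current cd source : Int)
    (s : PySem.Dict Int (Int × Int) × List (Int × Int) × PySem.Set String) (neighbor : Int) :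
    PySem.Dict Int (Int × Int) × List (Int × Int) × PySem.Set String :=
  let s1 :=
    if decide (neighbor ∈ targets) && !decide (current ∈ targets) then
      (s.1, s.2.1, PySem.Set.add s.2.2 (edgeStr neighbor current))
    else if !(s.1.contains neighbor) && !decide (neighbor ∈ targets) then
      (s.1.insert neighbor (cd + 1, source), s.2.1 ++ [(neighbor, source)], s.2.2)
    else s
  if decide (current ∈ targets) && !decide (neighbor ∈ targets) then
    (s1.1, s1.2.1, PySem.Set.add s1.2.2 (edgeStr current neighbor))
  else s1

-- all neighbours occurring in the graph (used only as a termination measure)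
def aPool (graph : List (Int × List Int)) : List Int := PySem.Set.ofList (graph.flatMap (·.2))

def missDict (graph : List (Int × List Int)) (vis : PySem.Dict Int (Int × Int)) : Nat :=
  (aPool graph).countP (fun x => !vis.contains x)

-- generic strict countP lemma (termination bookkeeping)
theorem countP_lt_of {α : Type} (l : List α) (p q : α → Bool)
    (himp : ∀ x, q x = true → p x = true) (k : α) (hk : k ∈ l)
    (hq : q k = false) (hp : p k = true) : l.countP q < l.countP p := by
  induction l with
  | nil => cases hk
  | cons a t ih =>
    have hmono : t.countP q ≤ t.countP p := List.countP_mono_left (fun x _ => himp x)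
    rcases List.mem_cons.mp hk with rfl | hk'
    · simp [hq, hp]; omega
    · have := ih hk'
      by_cases hqa : q a = true
      · simp [hqa, himp a hqa]; omega
      · simp at hqa
        simp [hqa]
        by_cases hpa : p a = true <;> simp [hpa] <;> omega

theorem missDict_insert_lt (graph : List (Int × List Int)) (vis : PySem.Dict Int (Int × Int))
    (n : Int) (v : Int × Int) (hn : n ∈ aPool graph) (hc : vis.contains n = false) :
    missDict graph (vis.insert n v) < missDict graph vis := by
  unfold missDict
  refine countP_lt_of _ _ _ ?_ n hn ?_ ?_
  · intro x hx
    simp only [Bool.not_eq_true'] at hx ⊢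
    rw [PySem.Dict.contains_insert] at hx
    exact (Bool.or_eq_false_iff.mp hx).2
  · simp [PySem.Dict.contains_insert_self]
  · simp [hc]

theorem aBody_measure (graph : List (Int × List Int)) (targets : List Int) (current cd source : Int)
    (s : PySem.Dict Int (Int × Int) × List (Int × Int) × PySem.Set String) (n : Int)
    (hn : n ∈ aPool graph) :
    2 * missDict graph (aBody targets current cd source s n).1 +
      (aBody targets current cd source s n).2.1.length ≤
    2 * missDict graph s.1 + s.2.1.length := by
  obtain ⟨vis, q, ans⟩ := s
  unfold aBody
  by_cases hA : (decide (n ∈ targets) && !decide (current ∈ targets)) = true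
  · have hC : (decide (current ∈ targets) && !decide (n ∈ targets)) = false := by
      simp only [Bool.and_eq_true, decide_eq_true_eq, Bool.not_eq_true'] at hA
      simp [hA.1]
    simp [hA, hC]
  · simp only [Bool.not_eq_true] at hA
    by_cases hB : (!vis.contains n && !decide (n ∈ targets)) = true
    · simp only [Bool.and_eq_true, Bool.not_eq_true', decide_eq_false_iff_not] at hB
      have hlt := missDict_insert_lt graph vis n (cd + 1, source) hn hB.1
      by_cases hC : current ∈ targets
      · simp [hA, hB, hC]; omega
      · simp [hA, hB, hC]; omega
    · simp only [Bool.not_eq_true] at hB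
      by_cases hC : (decide (current ∈ targets) && !decide (n ∈ targets)) = true
      · simp [hA, hB, hC]
      · simp only [Bool.not_eq_true] at hC
        simp [hA, hB, hC]

theorem aFold_measure (graph : List (Int × List Int)) (targets : List Int) (current cd source : Int)
    (l : List Int) (hl : ∀ v ∈ l, v ∈ aPool graph)
    (vis : PySem.Dict Int (Int × Int)) (q : List (Int × Int)) (ans : PySem.Set String) :
    2 * missDict graph (l.foldl (aBody targets current cd source) (vis, q, ans)).1 +
      (l.foldl (aBody targets current cd source) (vis, q, ans)).2.1.length ≤
    2 * missDict graph vis + q.length := by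
  suffices h : ∀ (l : List Int), (∀ v ∈ l, v ∈ aPool graph) →
      ∀ (s : PySem.Dict Int (Int × Int) × List (Int × Int) × PySem.Set String),
      2 * missDict graph (l.foldl (aBody targets current cd source) s).1 +
        (l.foldl (aBody targets current cd source) s).2.1.length ≤
      2 * missDict graph s.1 + s.2.1.length by
    exact h l hl (vis, q, ans)
  intro l hl'
  induction l with
  | nil => intro s; simp
  | cons n t ih =>
    intro s
    have h1 := aBody_measure graph targets current cd source s n (hl' n (by simp))
    have h2 := ih (fun v hv => hl' v (by simp [hv])) (aBody targets current cd source s n)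
    simp only [List.foldl_cons]
    omega

theorem nbrs_subset_pool (graph : List (Int × List Int)) (u : Int) :
    ∀ v ∈ (PySem.Dict.mk graph).getD u [], v ∈ aPool graph := by
  intro v hv
  unfold aPool
  rw [PySem.Set.mem_ofList]
  induction graph with
  | nil => simp [PySem.Dict.getD_eq_get?_getD, PySem.Dict.get?] at hv
  | cons p rest ih =>
    rw [PySem.Dict.getD_eq_get?_getD, PySem.Dict.get?_mk_cons] at hv
    by_cases h : (p.1 == u) = true
    · simp only [h, if_true, Option.getD_some] at hv
      exact List.mem_flatMap.mpr ⟨p, by simp, hv⟩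
    · simp only [h, Bool.false_eq_true, if_false] at hv
      rw [← PySem.Dict.getD_eq_get?_getD] at hv
      rcases List.mem_flatMap.mp (ih hv) with ⟨w, hw, hvw⟩
      exact List.mem_flatMap.mpr ⟨w, by simp [hw], hvw⟩

-- A's 'while queue:' loop
def loopA (graph : List (Int × List Int)) (targets : List Int) :
    List (Int × Int) → PySem.Dict Int (Int × Int) → PySem.Set String → PySem.Set String
  | [], _, ans => ans
  | (current, source) :: rest, vis, ans =>
    -- current_distance, _ = visited[current]  (the key is always present when reached from A's entry)
    let cd := (vis.getD current (0, current)).1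
    let r := ((PySem.Dict.mk graph).getD current []).foldl (aBody targets current cd source) (vis, rest, ans)
    loopA graph targets r.2.1 r.1 r.2.2
  termination_by q vis _ => 2 * missDict graph vis + q.length
  decreasing_by
    have h := aFold_measure graph targets current ((vis.getD current (0, current)).1) source
      ((PySem.Dict.mk graph).getD current []) (nbrs_subset_pool graph current) vis rest ans
    simp only [List.length_cons]
    omega

def bfs_from_gateways (graph : List (Int × List Int)) (targets : List Int) : List String :=
  let init := targets.foldl
    (fun (s : List (Int × Int) × PySem.Dict Int (Int × Int)) t => (s.1 ++ [(t, t)], s.2.insert t (0, t)))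
    ([], PySem.Dict.empty)
  let ans := loopA graph targets init.1 init.2 PySem.Set.empty
  PySem.List.sorted ans (fun x => x) false

-- ===== PORT B =====

-- one round's new frontier: {v for u in frontier for v in graph.get(u, []) if v not in tset and v not in region}
def bNxt (graph : List (Int × List Int)) (targets : List Int)
    (region frontier : PySem.Set Int) : PySem.Set Int :=
  frontier.foldl (fun nx u =>
    ((PySem.Dict.mk graph).getD u []).foldl (fun nx v =>
      if !PySem.Set.contains (PySem.Set.ofList targets) v && !PySem.Set.contains region v
      then PySem.Set.add nx v else nx) nx) PySem.Set.empty

def missSet (graph : List (Int × List Int)) (s : PySem.Set Int) : Nat :=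
  (aPool graph).countP (fun x => !PySem.Set.contains s x)

-- membership / Nodup of a conditional-add fold (shared by both sides' set-building loops)
theorem mem_foldl_addIf {α : Type} [BEq α] [LawfulBEq α] (P : α → Bool) (l : List α)
    (s : PySem.Set α) (x : α) :
    x ∈ l.foldl (fun s v => if P v then PySem.Set.add s v else s) s ↔
      x ∈ s ∨ (x ∈ l ∧ P x = true) := by
  induction l generalizing s with
  | nil => simp
  | cons a t ih =>
    simp only [List.foldl_cons]
    rw [ih]
    by_cases h : P a = true
    · simp only [h, if_true, PySem.Set.mem_add]
      by_cases hx : x = a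
      · subst hx; simp [h]
      · simp [hx]; try tauto
    · simp only [h, Bool.false_eq_true, if_false]
      by_cases hx : x = a
      · subst hx; simp [h]
      · simp [hx]; try tauto
  
theorem nodup_foldl_addIf {α : Type} [BEq α] [LawfulBEq α] (P : α → Bool) (l : List α)
    (s : PySem.Set α) (h : s.Nodup) :
    (l.foldl (fun s v => if P v then PySem.Set.add s v else s) s).Nodup := by
  induction l generalizing s with
  | nil => exact h
  | cons a t ih =>
    simp only [List.foldl_cons]
    by_cases ha : P a = true
    · simp only [ha, if_true]; exact ih _ (PySem.Set.nodup_add _ _ h)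
    · simp only [ha, Bool.false_eq_true, if_false]; exact ih _ h

theorem mem_bNxt (graph : List (Int × List Int)) (targets : List Int)
    (region frontier : PySem.Set Int) (x : Int) :
    x ∈ bNxt graph targets region frontier ↔
      ∃ u ∈ frontier, x ∈ (PySem.Dict.mk graph).getD u [] ∧ x ∉ targets ∧ x ∉ region := by
  unfold bNxt
  have key : ∀ (fr : List Int) (s : PySem.Set Int),
      x ∈ fr.foldl (fun nx u =>
        ((PySem.Dict.mk graph).getD u []).foldl (fun nx v =>
          if !PySem.Set.contains (PySem.Set.ofList targets) v && !PySem.Set.contains region v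
          then PySem.Set.add nx v else nx) nx) s ↔
      x ∈ s ∨ ∃ u ∈ fr, x ∈ (PySem.Dict.mk graph).getD u [] ∧ x ∉ targets ∧ x ∉ region := by
    intro fr
    induction fr with
    | nil => simp
    | cons u t ih =>
      intro s
      simp only [List.foldl_cons]
      rw [ih, mem_foldl_addIf]
      have hp : ∀ y : Int, ((!PySem.Set.contains (PySem.Set.ofList targets) y &&
          !PySem.Set.contains region y) = true) ↔ (y ∉ targets ∧ y ∉ region) := by
        intro y
        rw [Bool.and_eq_true, Bool.not_eq_true', Bool.not_eq_true']
        constructor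
        · intro ⟨h1, h2⟩
          refine ⟨fun hy => ?_, fun hy => ?_⟩
          · have := (PySem.Set.contains_iff (PySem.Set.ofList targets) y).mpr
              ((PySem.Set.mem_ofList _ _).mpr hy)
            rw [this] at h1; cases h1
          · have := (PySem.Set.contains_iff region y).mpr hy
            rw [this] at h2; cases h2
        · intro ⟨h1, h2⟩
          constructor
          · rw [Bool.eq_false_iff]; intro hc
            exact h1 ((PySem.Set.mem_ofList _ _).mp ((PySem.Set.contains_iff _ _).mp hc))
          · rw [Bool.eq_false_iff]; intro hc
            exact h2 ((PySem.Set.contains_iff _ _).mp hc)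
      rw [hp x]
      simp only [List.mem_cons]
      constructor
      · rintro (h | ⟨u', hu', hrest⟩)
        · tauto
        · exact Or.inr ⟨u', Or.inr hu', hrest⟩
      · rintro (h | ⟨u', (rfl | hu'), hrest⟩)
        · tauto
        · exact Or.inl (Or.inr ⟨hrest.1, hrest.2⟩)
        · exact Or.inr ⟨u', hu', hrest⟩
  rw [key frontier PySem.Set.empty]
  simp [PySem.Set.empty]

theorem nodup_bNxt (graph : List (Int × List Int)) (targets : List Int)
    (region frontier : PySem.Set Int) : (bNxt graph targets region frontier).Nodup := by
  unfold bNxt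
  have key : ∀ (fr : List Int) (s : PySem.Set Int), s.Nodup →
      (fr.foldl (fun nx u =>
        ((PySem.Dict.mk graph).getD u []).foldl (fun nx v =>
          if !PySem.Set.contains (PySem.Set.ofList targets) v && !PySem.Set.contains region v
          then PySem.Set.add nx v else nx) nx) s).Nodup := by
    intro fr
    induction fr with
    | nil => exact fun s h => h
    | cons u t ih =>
      intro s hs
      simp only [List.foldl_cons]
      exact ih _ (nodup_foldl_addIf _ _ _ hs)
  exact key frontier PySem.Set.empty (by simp [PySem.Set.empty])

theorem missSet_add_lt (graph : List (Int × List Int)) (region : PySem.Set Int) (x : Int)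
    (hx : x ∈ aPool graph) (hnx : x ∉ region) :
    missSet graph (PySem.Set.add region x) < missSet graph region := by
  unfold missSet
  refine countP_lt_of _ _ _ ?_ x hx ?_ ?_
  · intro y hy
    simp only [Bool.not_eq_true'] at hy ⊢
    rw [Bool.eq_false_iff] at hy ⊢
    intro hc
    exact hy ((PySem.Set.contains_iff _ _).mpr ((PySem.Set.mem_add _ _ _).mpr
      (Or.inl ((PySem.Set.contains_iff _ _).mp hc))))
  · have h : PySem.Set.contains (PySem.Set.add region x) x = true :=
      (PySem.Set.contains_iff _ _).mpr ((PySem.Set.mem_add _ _ _).mpr (Or.inr rfl))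
    simp [h]
  · simp only [Bool.not_eq_true']
    rw [Bool.eq_false_iff]
    intro hc
    exact hnx ((PySem.Set.contains_iff _ _).mp hc)

theorem missSet_union_le (graph : List (Int × List Int)) (region : PySem.Set Int)
    (nxt : List Int) (hnd : nxt.Nodup)
    (hsub : ∀ y ∈ nxt, y ∈ aPool graph ∧ y ∉ region) :
    missSet graph (PySem.Set.union region nxt) + nxt.length ≤ missSet graph region := by
  induction nxt generalizing region with
  | nil =>
    have h : PySem.Set.union region ([] : List Int) = region := rfl
    simp [h]
  | cons x t ih =>
    have hx := hsub x (by simp)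
    have h1 := missSet_add_lt graph region x hx.1 hx.2
    have hstep : PySem.Set.union region (x :: t) = PySem.Set.union (PySem.Set.add region x) t := rfl
    rw [hstep]
    have h2 := ih (PySem.Set.add region x) (List.Nodup.of_cons hnd) (by
      intro y hy
      refine ⟨(hsub y (by simp [hy])).1, ?_⟩
      intro hmem
      rcases (PySem.Set.mem_add _ _ _).mp hmem with h | rfl
      · exact (hsub y (by simp [hy])).2 h
      · exact (List.nodup_cons.mp hnd).1 hy)
    simp only [List.length_cons]
    omega

theorem bNxt_measure (graph : List (Int × List Int)) (targets : List Int)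
    (region frontier : PySem.Set Int) :
    2 * missSet graph (PySem.Set.union region (bNxt graph targets region frontier)) +
      (bNxt graph targets region frontier).length ≤ 2 * missSet graph region := by
  have h := missSet_union_le graph region (bNxt graph targets region frontier)
    (nodup_bNxt graph targets region frontier) (by
      intro y hy
      rcases (mem_bNxt graph targets region frontier y).mp hy with ⟨u, _, hynb, _, hyreg⟩
      exact ⟨nbrs_subset_pool graph u y hynb, hyreg⟩)
  omega

-- B's 'while frontier:' loop
def regionLoop (graph : List (Int × List Int)) (targets : List Int) :
    PySem.Set Int → PySem.Set Int → PySem.Set Int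
  | region, [] => region
  | region, u :: fr =>
    let nxt := bNxt graph targets region (u :: fr)
    regionLoop graph targets (PySem.Set.union region nxt) nxt
  termination_by region frontier => 2 * missSet graph region + min frontier.length 1
  decreasing_by
    have h := bNxt_measure graph targets region (u :: fr)
    rcases hn : bNxt graph targets region (u :: fr) with _ | ⟨x, t⟩ <;>
      simp only [hn] at h ⊢ <;> simp_all <;> omega

def bfs_from_gateways_alt (graph : List (Int × List Int)) (targets : List Int) : List String :=
  let tset := PySem.Set.ofList targets
  let region := regionLoop graph targets PySem.Set.empty (PySem.Set.ofList targets)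
  let ans := (PySem.Dict.mk graph).keys.foldl (fun ans node =>
    ((PySem.Dict.mk graph).getD node []).foldl (fun ans n =>
      let ans := if PySem.Set.contains tset node && !PySem.Set.contains tset n
                 then PySem.Set.add ans (edgeStr node n) else ans
      if PySem.Set.contains region node && PySem.Set.contains tset n
      then PySem.Set.add ans (edgeStr n node) else ans) ans) PySem.Set.empty
  PySem.List.sorted ans (fun x => x) false

-- ===== PRECONDITION & SPEC =====
def Spec_bfs_from_gateways (graph : List (Int × List Int)) (targets : List Int) (out : List String) : Prop := out = bfs_from_gateways_alt graph targets
instance (graph : List (Int × List Int)) (targets : List Int) (out : List String) : Decidable (Spec_bfs_from_gateways graph targets out) := by unfold Spec_bfs_from_gateways; infer_instance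

-- ===== CLAIM (what is proved, stated in full; the proofs are below) =====
def Claim_equal_bfs_from_gateways : Prop := ∀ (graph : List (Int × List Int)) (targets : List Int), Dom_bfs_from_gateways graph targets → Spec_bfs_from_gateways graph targets (bfs_from_gateways graph targets)

-- ===== LEMMAS AND PROOFS =====

-- adjacency lookup, reachability of non-target nodes, and the common edge-label set
def nbrsOf (graph : List (Int × List Int)) (u : Int) : List Int :=
  (PySem.Dict.mk graph).getD u []

inductive ReachN (graph : List (Int × List Int)) (targets : List Int) : Int → Prop
  | fromT (t v : Int) : t ∈ targets → v ∈ nbrsOf graph t → v ∉ targets → ReachN graph targets v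
  | step (u v : Int) : ReachN graph targets u → v ∈ nbrsOf graph u → v ∉ targets →
      ReachN graph targets v

def EdgeSet (graph : List (Int × List Int)) (targets : List Int) (s : String) : Prop :=
  (∃ t n, t ∈ targets ∧ n ∈ nbrsOf graph t ∧ n ∉ targets ∧ s = edgeStr t n) ∨
  (∃ u n, ReachN graph targets u ∧ n ∈ nbrsOf graph u ∧ n ∈ targets ∧ s = edgeStr n u)

theorem ReachN_not_target {graph : List (Int × List Int)} {targets : List Int} {u : Int}
    (h : ReachN graph targets u) : u ∉ targets := by
  cases h <;> assumption

-- per-element effect of A's loop body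
theorem aBody_contains (targets : List Int) (current cd source : Int)
    (s : PySem.Dict Int (Int × Int) × List (Int × Int) × PySem.Set String) (n x : Int) :
    ((aBody targets current cd source s n).1.contains x = true) ↔
      (s.1.contains x = true ∨ (x = n ∧ n ∉ targets)) := by
  obtain ⟨vis, q, ans⟩ := s
  unfold aBody
  by_cases hnt : n ∈ targets
  · by_cases hct : current ∈ targets <;> simp [hnt, hct]
  · by_cases hvc : vis.contains n = true
    · by_cases hct : current ∈ targets <;> simp [hnt, hct, hvc] <;> (rintro rfl; exact hvc)
    · simp only [Bool.not_eq_true] at hvc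
      by_cases hct : current ∈ targets <;>
        simp [hnt, hct, hvc, PySem.Dict.contains_insert] <;> tauto

theorem aBody_queue (targets : List Int) (current cd source : Int)
    (s : PySem.Dict Int (Int × Int) × List (Int × Int) × PySem.Set String) (n : Int)
    (p : Int × Int) :
    (p ∈ (aBody targets current cd source s n).2.1) ↔
      (p ∈ s.2.1 ∨ (p = (n, source) ∧ n ∉ targets ∧ s.1.contains n = false)) := by
  obtain ⟨vis, q, ans⟩ := s
  unfold aBody
  by_cases hnt : n ∈ targets
  · by_cases hct : current ∈ targets <;> simp [hnt, hct]
  · by_cases hvc : vis.contains n = true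
    · by_cases hct : current ∈ targets <;> simp [hnt, hct, hvc]
    · simp only [Bool.not_eq_true] at hvc
      by_cases hct : current ∈ targets <;> simp [hnt, hct, hvc] <;> tauto

theorem aBody_ans (targets : List Int) (current cd source : Int)
    (s : PySem.Dict Int (Int × Int) × List (Int × Int) × PySem.Set String) (n : Int)
    (t : String) :
    (t ∈ (aBody targets current cd source s n).2.2) ↔
      (t ∈ s.2.2 ∨ (n ∈ targets ∧ current ∉ targets ∧ t = edgeStr n current) ∨
        (current ∈ targets ∧ n ∉ targets ∧ t = edgeStr current n)) := by
  obtain ⟨vis, q, ans⟩ := s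
  unfold aBody
  by_cases hnt : n ∈ targets
  · by_cases hct : current ∈ targets <;> simp [hnt, hct, PySem.Set.mem_add] <;> tauto
  · by_cases hvc : vis.contains n = true
    · by_cases hct : current ∈ targets <;> simp [hnt, hct, hvc, PySem.Set.mem_add] <;> tauto
    · simp only [Bool.not_eq_true] at hvc
      by_cases hct : current ∈ targets <;> simp [hnt, hct, hvc, PySem.Set.mem_add] <;> tauto

theorem aBody_nodup (targets : List Int) (current cd source : Int)
    (s : PySem.Dict Int (Int × Int) × List (Int × Int) × PySem.Set String) (n : Int)
    (h : s.2.2.Nodup) : (aBody targets current cd source s n).2.2.Nodup := by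
  obtain ⟨vis, q, ans⟩ := s
  unfold aBody
  by_cases hnt : n ∈ targets
  · by_cases hct : current ∈ targets <;> simp [hnt, hct] <;>
      first | exact h | exact PySem.Set.nodup_add _ _ h
  · by_cases hvc : vis.contains n = true
    · by_cases hct : current ∈ targets <;> simp [hnt, hct, hvc] <;>
        first | exact h | exact PySem.Set.nodup_add _ _ h
    · simp only [Bool.not_eq_true] at hvc
      by_cases hct : current ∈ targets <;> simp [hnt, hct, hvc] <;>
        first | exact h | exact PySem.Set.nodup_add _ _ h

-- fold-level effect of A's inner for-loop
theorem aFold_contains (targets : List Int) (current cd source : Int) (l : List Int) :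
    ∀ (s : PySem.Dict Int (Int × Int) × List (Int × Int) × PySem.Set String) (x : Int),
    ((l.foldl (aBody targets current cd source) s).1.contains x = true) ↔
      (s.1.contains x = true ∨ (x ∈ l ∧ x ∉ targets)) := by
  induction l with
  | nil => simp
  | cons n t ih =>
    intro s x
    simp only [List.foldl_cons]
    rw [ih, aBody_contains]
    simp only [List.mem_cons]
    constructor
    · rintro ((h | ⟨rfl, hP⟩) | ⟨hm, hP⟩)
      exacts [Or.inl h, Or.inr ⟨Or.inl rfl, hP⟩, Or.inr ⟨Or.inr hm, hP⟩]
    · rintro (h | ⟨(rfl | hm), hP⟩)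
      exacts [Or.inl (Or.inl h), Or.inl (Or.inr ⟨rfl, hP⟩), Or.inr ⟨hm, hP⟩]

theorem aFold_queue (targets : List Int) (current cd source : Int) (l : List Int) :
    ∀ (s : PySem.Dict Int (Int × Int) × List (Int × Int) × PySem.Set String) (p : Int × Int),
    (p ∈ (l.foldl (aBody targets current cd source) s).2.1) ↔
      (p ∈ s.2.1 ∨ (p.2 = source ∧ p.1 ∈ l ∧ p.1 ∉ targets ∧ s.1.contains p.1 = false)) := by
  induction l with
  | nil => simp
  | cons n t ih =>
    intro s p
    obtain ⟨p1, p2⟩ := p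
    simp only [List.foldl_cons]
    rw [ih, aBody_queue]
    have hg : ((aBody targets current cd source s n).1.contains p1 = false) ↔
        ¬(s.1.contains p1 = true ∨ (p1 = n ∧ n ∉ targets)) := by
      rw [Bool.eq_false_iff]
      exact not_congr (aBody_contains targets current cd source s n p1)
    rw [hg]
    simp only [List.mem_cons, Prod.mk.injEq, Bool.not_eq_true]
    constructor
    · rintro ((h | ⟨⟨rfl, rfl⟩, hnt, hc⟩) | ⟨rfl, hmem, hnt, hcc⟩)
      · exact Or.inl h
      · exact Or.inr ⟨rfl, Or.inl rfl, hnt, hc⟩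
      · rw [not_or] at hcc
        exact Or.inr ⟨rfl, Or.inr hmem, hnt, by rw [Bool.eq_false_iff]; exact hcc.1⟩
    · rintro (h | ⟨rfl, (rfl | hmem), hnt, hc⟩)
      · exact Or.inl (Or.inl h)
      · exact Or.inl (Or.inr ⟨⟨rfl, rfl⟩, hnt, hc⟩)
      · by_cases hpn : p1 = n
        · subst hpn
          exact Or.inl (Or.inr ⟨⟨rfl, rfl⟩, hnt, hc⟩)
        · refine Or.inr ⟨rfl, hmem, hnt, not_or.mpr ⟨?_, ?_⟩⟩
          · rw [Bool.eq_false_iff] at hc; exact hc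
          · exact fun h' => hpn h'.1
    
theorem aFold_ans (targets : List Int) (current cd source : Int) (l : List Int) :
    ∀ (s : PySem.Dict Int (Int × Int) × List (Int × Int) × PySem.Set String) (t : String),
    (t ∈ (l.foldl (aBody targets current cd source) s).2.2) ↔
      (t ∈ s.2.2 ∨ (∃ v ∈ l, v ∈ targets ∧ current ∉ targets ∧ t = edgeStr v current) ∨
        (∃ v ∈ l, current ∈ targets ∧ v ∉ targets ∧ t = edgeStr current v)) := by
  induction l with
  | nil => simp
  | cons n tl ih =>
    intro s t
    simp only [List.foldl_cons]
    rw [ih, aBody_ans]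
    simp only [List.mem_cons]
    constructor
    · rintro ((h | h | h) | ⟨v, hv, hrest⟩ | ⟨v, hv, hrest⟩)
      · exact Or.inl h
      · exact Or.inr (Or.inl ⟨n, Or.inl rfl, h⟩)
      · exact Or.inr (Or.inr ⟨n, Or.inl rfl, h⟩)
      · exact Or.inr (Or.inl ⟨v, Or.inr hv, hrest⟩)
      · exact Or.inr (Or.inr ⟨v, Or.inr hv, hrest⟩)
    · rintro (h | ⟨v, (rfl | hv), hrest⟩ | ⟨v, (rfl | hv), hrest⟩)
      · exact Or.inl (Or.inl h)
      · exact Or.inl (Or.inr (Or.inl hrest))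
      · exact Or.inr (Or.inl ⟨v, hv, hrest⟩)
      · exact Or.inl (Or.inr (Or.inr hrest))
      · exact Or.inr (Or.inr ⟨v, hv, hrest⟩)

theorem aFold_nodup (targets : List Int) (current cd source : Int) (l : List Int) :
    ∀ (s : PySem.Dict Int (Int × Int) × List (Int × Int) × PySem.Set String),
    s.2.2.Nodup → (l.foldl (aBody targets current cd source) s).2.2.Nodup := by
  induction l with
  | nil => exact fun _ h => h
  | cons n t ih =>
    intro s hs
    simp only [List.foldl_cons]
    exact ih _ (aBody_nodup targets current cd source s n hs)

-- the invariant of A's while-loop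
def ExpandedA (graph : List (Int × List Int)) (targets : List Int)
    (vis : PySem.Dict Int (Int × Int)) (ans : PySem.Set String) (u : Int) : Prop :=
  ∀ v ∈ nbrsOf graph u,
    (v ∈ targets → u ∉ targets → edgeStr v u ∈ ans) ∧
    (v ∉ targets → vis.contains v = true) ∧
    (u ∈ targets → v ∉ targets → edgeStr u v ∈ ans)

def InvA (graph : List (Int × List Int)) (targets : List Int)
    (queue : List (Int × Int)) (vis : PySem.Dict Int (Int × Int)) (ans : PySem.Set String) : Prop :=
  (∀ t ∈ targets, vis.contains t = true) ∧
  (∀ u : Int, vis.contains u = true → u ∈ targets ∨ ReachN graph targets u) ∧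
  (∀ p ∈ queue, vis.contains p.1 = true) ∧
  (∀ u : Int, vis.contains u = true → u ∈ queue.map Prod.fst ∨ ExpandedA graph targets vis ans u) ∧
  (∀ s ∈ ans, EdgeSet graph targets s) ∧ ans.Nodup

theorem loopA_spec (graph : List (Int × List Int)) (targets : List Int) :
    ∀ queue vis ans, InvA graph targets queue vis ans →
    (∀ s, s ∈ loopA graph targets queue vis ans ↔ EdgeSet graph targets s) ∧
    (loopA graph targets queue vis ans).Nodup := by
  intro queue vis ans
  induction queue, vis, ans using loopA.induct graph targets with
  | case1 vis ans =>
    rintro ⟨h1, h2, h3, h4, h5, h6⟩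
    rw [loopA]
    have hexp : ∀ u, vis.contains u = true → ExpandedA graph targets vis ans u := by
      intro u hu
      rcases h4 u hu with hq | hE
      · simp at hq
      · exact hE
    have hreach : ∀ u, ReachN graph targets u → vis.contains u = true := by
      intro u hr
      induction hr with
      | fromT t v ht hv hvt => exact ((hexp t (h1 t ht)) v hv).2.1 hvt
      | step u' v hr' hv hvt ihr => exact ((hexp u' ihr) v hv).2.1 hvt
    refine ⟨fun s => ⟨h5 s, ?_⟩, h6⟩
    rintro (⟨t, n, ht, hn, hnt, rfl⟩ | ⟨u, n, hu, hn, hnT, rfl⟩)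
    · exact ((hexp t (h1 t ht)) n hn).2.2 ht hnt
    · exact ((hexp u (hreach u hu)) n hn).1 hnT (ReachN_not_target hu)
  | case2 current source rest vis ans cd r ih =>
    rintro ⟨h1, h2, h3, h4, h5, h6⟩
    rw [loopA]
    have hcur : vis.contains current = true := h3 (current, source) (by simp)
    have hcurTR := h2 current hcur
    have hl : ∃ l : List Int, l = (PySem.Dict.mk graph).getD current [] := ⟨_, rfl⟩
    obtain ⟨l, hl⟩ := hl
    have Fc := fun x => aFold_contains targets current cd source l (vis, rest, ans) x
    have Fq := fun p => aFold_queue targets current cd source l (vis, rest, ans) p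
    have Fa := fun t => aFold_ans targets current cd source l (vis, rest, ans) t
    have Fnd := aFold_nodup targets current cd source l (vis, rest, ans) h6
    have hrdef : r = l.foldl (aBody targets current cd source) (vis, rest, ans) := by rw [hl]
    rw [← hrdef] at Fc Fq Fa Fnd
    have hlnbrs : l = nbrsOf graph current := hl
    have hmono : ∀ w, ExpandedA graph targets vis ans w → ExpandedA graph targets r.1 r.2.2 w := by
      intro w hE v hv
      exact ⟨fun a b => (Fa _).mpr (Or.inl ((hE v hv).1 a b)),
             fun a => (Fc v).mpr (Or.inl ((hE v hv).2.1 a)),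
             fun a b => (Fa _).mpr (Or.inl ((hE v hv).2.2 a b))⟩
    have hexpcur : ExpandedA graph targets r.1 r.2.2 current := by
      intro v hv
      rw [← hlnbrs] at hv
      refine ⟨fun hvT hcT => ?_, fun hvnT => ?_, fun hcT hvnT => ?_⟩
      · exact (Fa _).mpr (Or.inr (Or.inl ⟨v, hv, hvT, hcT, rfl⟩))
      · exact (Fc v).mpr (Or.inr ⟨hv, hvnT⟩)
      · exact (Fa _).mpr (Or.inr (Or.inr ⟨v, hv, hcT, hvnT, rfl⟩))
    apply ih
    refine ⟨?_, ?_, ?_, ?_, ?_, Fnd⟩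
    · intro t ht; exact (Fc t).mpr (Or.inl (h1 t ht))
    · intro u hu
      rcases (Fc u).mp hu with hold | ⟨hul, hunt⟩
      · exact h2 u hold
      · rw [hlnbrs] at hul
        rcases hcurTR with hct | hrc
        · exact Or.inr (ReachN.fromT current u hct hul hunt)
        · exact Or.inr (ReachN.step current u hrc hul hunt)
    · intro p hp
      rcases (Fq p).mp hp with hold | ⟨hsrc, hmem, hnt, hcf⟩
      · exact (Fc p.1).mpr (Or.inl (h3 p (by simp [hold])))
      · exact (Fc p.1).mpr (Or.inr ⟨hmem, hnt⟩)
    · intro u hu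
      rcases (Fc u).mp hu with hold | ⟨hul, hunt⟩
      · rcases h4 u hold with hq | hE
        · simp only [List.map_cons, List.mem_cons] at hq
          rcases hq with rfl | hq
          · exact Or.inr hexpcur
          · rcases List.mem_map.mp hq with ⟨p, hp, rfl⟩
            exact Or.inl (List.mem_map.mpr ⟨p, (Fq p).mpr (Or.inl hp), rfl⟩)
        · exact Or.inr (hmono u hE)
      · by_cases hvcu : vis.contains u = true
        · rcases h4 u hvcu with hq | hE
          · simp only [List.map_cons, List.mem_cons] at hq
            rcases hq with rfl | hq
            · exact Or.inr hexpcur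
            · rcases List.mem_map.mp hq with ⟨p, hp, rfl⟩
              exact Or.inl (List.mem_map.mpr ⟨p, (Fq p).mpr (Or.inl hp), rfl⟩)
          · exact Or.inr (hmono u hE)
        · simp only [Bool.not_eq_true] at hvcu
          exact Or.inl (List.mem_map.mpr
            ⟨(u, source), (Fq (u, source)).mpr (Or.inr ⟨rfl, hul, hunt, hvcu⟩), rfl⟩)
    · intro s hs
      rcases (Fa s).mp hs with hold | ⟨v, hv, hvT, hcnT, rfl⟩ | ⟨v, hv, hcT, hvnT, rfl⟩
      · exact h5 s hold
      · have hrc : ReachN graph targets current := hcurTR.resolve_left hcnT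
        rw [hlnbrs] at hv
        exact Or.inr ⟨current, v, hrc, hv, hvT, rfl⟩
      · rw [hlnbrs] at hv
        exact Or.inl ⟨current, v, hcT, hv, hvnT, rfl⟩

-- A's initialisation loop
theorem init_spec (f : List (Int × Int) × PySem.Dict Int (Int × Int) → Int → List (Int × Int) × PySem.Dict Int (Int × Int))
    (hf : f = fun s t => (s.1 ++ [(t, t)], s.2.insert t (0, t))) :
    ∀ (ts : List Int) (q : List (Int × Int)) (d : PySem.Dict Int (Int × Int)),
    (ts.foldl f (q, d)).1 = q ++ ts.map (fun t => (t, t)) ∧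
    (∀ x, ((ts.foldl f (q, d)).2.contains x = true ↔ d.contains x = true ∨ x ∈ ts)) := by
  subst hf
  intro ts
  induction ts with
  | nil => simp
  | cons t tl ih =>
    intro q d
    simp only [List.foldl_cons]
    obtain ⟨ih1, ih2⟩ := ih (q ++ [(t, t)]) (d.insert t (0, t))
    refine ⟨by rw [ih1]; simp, fun x => ?_⟩
    rw [ih2 x, PySem.Dict.contains_insert]
    simp only [Bool.or_eq_true, beq_iff_eq, List.mem_cons]
    tauto

-- B's reachability loop invariant
def InvB (graph : List (Int × List Int)) (targets : List Int)
    (region frontier : PySem.Set Int) : Prop :=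
  (∀ x ∈ region, ReachN graph targets x) ∧
  (∀ x ∈ frontier, x ∈ targets ∨ x ∈ region) ∧
  (∀ u : Int, (u ∈ targets ∨ u ∈ region) →
      u ∈ frontier ∨ (∀ v ∈ nbrsOf graph u, v ∉ targets → v ∈ region))

theorem regionLoop_spec (graph : List (Int × List Int)) (targets : List Int) :
    ∀ region frontier, InvB graph targets region frontier →
    ∀ x, (x ∈ regionLoop graph targets region frontier ↔ ReachN graph targets x) := by
  intro region frontier
  induction region, frontier using regionLoop.induct graph targets with
  | case1 region =>
    rintro ⟨b1, b2, b3⟩ x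
    rw [regionLoop]
    refine ⟨fun h => b1 x h, fun hr => ?_⟩
    induction hr with
    | fromT t v ht hv hvt =>
      rcases b3 t (Or.inl ht) with hf | hcl
      · simp at hf
      · exact hcl v hv hvt
    | step u v hu hv hvt ihr =>
      rcases b3 u (Or.inr ihr) with hf | hcl
      · simp at hf
      · exact hcl v hv hvt
  | case2 region u fr nxt ih =>
    rintro ⟨b1, b2, b3⟩ x
    rw [regionLoop]
    have hnxtdef : nxt = bNxt graph targets region (u :: fr) := rfl
    apply ih
    have hmemnxt : ∀ y, y ∈ nxt ↔
        ∃ w ∈ u :: fr, y ∈ nbrsOf graph w ∧ y ∉ targets ∧ y ∉ region := by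
      intro y; rw [hnxtdef]; exact mem_bNxt graph targets region (u :: fr) y
    refine ⟨?_, ?_, ?_⟩
    · intro y hy
      rcases (PySem.Set.mem_union _ _ _).mp hy with hyr | hyn
      · exact b1 y hyr
      · rcases (hmemnxt y).mp hyn with ⟨w, hw, hynb, hynT, _⟩
        rcases b2 w hw with hwT | hwR
        · exact ReachN.fromT w y hwT hynb hynT
        · exact ReachN.step w y (b1 w hwR) hynb hynT
    · intro y hy
      exact Or.inr ((PySem.Set.mem_union _ _ _).mpr (Or.inr hy))
    · intro w hw
      by_cases hwn : w ∈ nxt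
      · exact Or.inl hwn
      · have hw' : w ∈ targets ∨ w ∈ region := by
          rcases hw with h | h
          · exact Or.inl h
          · rcases (PySem.Set.mem_union _ _ _).mp h with h' | h'
            · exact Or.inr h'
            · exact absurd h' hwn
        rcases b3 w hw' with hf | hcl
        · refine Or.inr fun v hv hvt => ?_
          by_cases hvr : v ∈ region
          · exact (PySem.Set.mem_union _ _ _).mpr (Or.inl hvr)
          · exact (PySem.Set.mem_union _ _ _).mpr
              (Or.inr ((hmemnxt v).mpr ⟨w, hf, hv, hvt, hvr⟩))
        · exact Or.inr fun v hv hvt => (PySem.Set.mem_union _ _ _).mpr (Or.inl (hcl v hv hvt))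

-- pass 2 of B: membership and Nodup of the collected answer set
theorem bAnsBody_mem (targets : List Int) (tset region : PySem.Set Int) (node : Int)
    (htset : tset = PySem.Set.ofList targets) (ns : List Int) :
    ∀ (ans : PySem.Set String) (t : String),
    (t ∈ ns.foldl (fun ans n =>
        let ans := if PySem.Set.contains tset node && !PySem.Set.contains tset n
                   then PySem.Set.add ans (edgeStr node n) else ans
        if PySem.Set.contains region node && PySem.Set.contains tset n
        then PySem.Set.add ans (edgeStr n node) else ans) ans) ↔
      (t ∈ ans ∨ (∃ n ∈ ns, node ∈ targets ∧ n ∉ targets ∧ t = edgeStr node n) ∨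
        (∃ n ∈ ns, node ∈ region ∧ n ∈ targets ∧ t = edgeStr n node)) := by
  have hts : ∀ y : Int, PySem.Set.contains tset y = true ↔ y ∈ targets := by
    intro y; rw [htset, PySem.Set.contains_iff, PySem.Set.mem_ofList]
  have hrg : ∀ y : Int, PySem.Set.contains region y = true ↔ y ∈ region := by
    intro y; rw [PySem.Set.contains_iff]
  induction ns with
  | nil => simp
  | cons n tl ih =>
    intro ans t
    simp only [List.foldl_cons]
    rw [ih]
    have hbody : ∀ (a : PySem.Set String),
        (t ∈ (let a' := if PySem.Set.contains tset node && !PySem.Set.contains tset n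
                        then PySem.Set.add a (edgeStr node n) else a
              if PySem.Set.contains region node && PySem.Set.contains tset n
              then PySem.Set.add a' (edgeStr n node) else a')) ↔
        (t ∈ a ∨ (node ∈ targets ∧ n ∉ targets ∧ t = edgeStr node n) ∨
          (node ∈ region ∧ n ∈ targets ∧ t = edgeStr n node)) := by
      intro a
      have key : ∀ (sI : PySem.Set Int) (P : Int → Prop) [DecidablePred P],
          (∀ y, PySem.Set.contains sI y = true ↔ P y) → ∀ y : Int,
          PySem.Set.contains sI y = decide (P y) := by
        intro sI P _ hs y
        by_cases h : P y
        · rw [show decide (P y) = true by simp [h]]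
          exact (hs y).mpr h
        · rw [show decide (P y) = false by simp [h], Bool.eq_false_iff]
          intro hc
          exact h ((hs y).mp hc)
      have b1 := key tset (· ∈ targets) hts node
      by_cases h1 : node ∈ targets <;> by_cases h2 : n ∈ targets <;>
        by_cases h3 : node ∈ region <;>
        simp [b1, htset, PySem.Set.mem_ofList, h1, h2, h3, PySem.Set.mem_add] <;> try tauto
    rw [hbody]
    simp only [List.mem_cons]
    constructor
    · rintro ((h | h | h) | ⟨v, hv, hrest⟩ | ⟨v, hv, hrest⟩)
      · exact Or.inl h
      · exact Or.inr (Or.inl ⟨n, Or.inl rfl, h⟩)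
      · exact Or.inr (Or.inr ⟨n, Or.inl rfl, h⟩)
      · exact Or.inr (Or.inl ⟨v, Or.inr hv, hrest⟩)
      · exact Or.inr (Or.inr ⟨v, Or.inr hv, hrest⟩)
    · rintro (h | ⟨v, (rfl | hv), hrest⟩ | ⟨v, (rfl | hv), hrest⟩)
      · exact Or.inl (Or.inl h)
      · exact Or.inl (Or.inr (Or.inl hrest))
      · exact Or.inr (Or.inl ⟨v, hv, hrest⟩)
      · exact Or.inl (Or.inr (Or.inr hrest))
      · exact Or.inr (Or.inr ⟨v, hv, hrest⟩)

theorem bAnsBody_nodup (tset region : PySem.Set Int) (node : Int) (ns : List Int) :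
    ∀ (ans : PySem.Set String), ans.Nodup →
    (ns.foldl (fun ans n =>
        let ans := if PySem.Set.contains tset node && !PySem.Set.contains tset n
                   then PySem.Set.add ans (edgeStr node n) else ans
        if PySem.Set.contains region node && PySem.Set.contains tset n
        then PySem.Set.add ans (edgeStr n node) else ans) ans).Nodup := by
  induction ns with
  | nil => exact fun _ h => h
  | cons n tl ih =>
    intro ans hans
    simp only [List.foldl_cons]
    apply ih
    split_ifs
    all_goals first
      | exact hans
      | exact PySem.Set.nodup_add _ _ hans
      | exact PySem.Set.nodup_add _ _ (PySem.Set.nodup_add _ _ hans)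

theorem bAnsOuter_mem (graph : List (Int × List Int)) (targets : List Int)
    (tset region : PySem.Set Int) (htset : tset = PySem.Set.ofList targets) (ks : List Int) :
    ∀ (ans : PySem.Set String) (t : String),
    (t ∈ ks.foldl (fun ans node =>
        ((PySem.Dict.mk graph).getD node []).foldl (fun ans n =>
          let ans := if PySem.Set.contains tset node && !PySem.Set.contains tset n
                     then PySem.Set.add ans (edgeStr node n) else ans
          if PySem.Set.contains region node && PySem.Set.contains tset n
          then PySem.Set.add ans (edgeStr n node) else ans) ans) ans) ↔
      (t ∈ ans ∨ ∃ node ∈ ks, ∃ n ∈ nbrsOf graph node,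
        ((node ∈ targets ∧ n ∉ targets ∧ t = edgeStr node n) ∨
          (node ∈ region ∧ n ∈ targets ∧ t = edgeStr n node))) := by
  induction ks with
  | nil => simp
  | cons k tl ih =>
    intro ans t
    simp only [List.foldl_cons]
    rw [ih, bAnsBody_mem targets tset region k htset]
    simp only [List.mem_cons]
    constructor
    · rintro ((h | ⟨n, hn, hrest⟩ | ⟨n, hn, hrest⟩) | ⟨node, hnode, n, hn, hrest⟩)
      · exact Or.inl h
      · exact Or.inr ⟨k, Or.inl rfl, n, hn, Or.inl hrest⟩
      · exact Or.inr ⟨k, Or.inl rfl, n, hn, Or.inr hrest⟩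
      · exact Or.inr ⟨node, Or.inr hnode, n, hn, hrest⟩
    · rintro (h | ⟨node, (rfl | hnode), n, hn, hrest⟩)
      · exact Or.inl (Or.inl h)
      · rcases hrest with h' | h'
        · exact Or.inl (Or.inr (Or.inl ⟨n, hn, h'⟩))
        · exact Or.inl (Or.inr (Or.inr ⟨n, hn, h'⟩))
      · exact Or.inr ⟨node, hnode, n, hn, hrest⟩

theorem bAnsOuter_nodup (graph : List (Int × List Int))
    (tset region : PySem.Set Int) (ks : List Int) :
    ∀ (ans : PySem.Set String), ans.Nodup →
    (ks.foldl (fun ans node =>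
        ((PySem.Dict.mk graph).getD node []).foldl (fun ans n =>
          let ans := if PySem.Set.contains tset node && !PySem.Set.contains tset n
                     then PySem.Set.add ans (edgeStr node n) else ans
          if PySem.Set.contains region node && PySem.Set.contains tset n
          then PySem.Set.add ans (edgeStr n node) else ans) ans) ans).Nodup := by
  induction ks with
  | nil => exact fun _ h => h
  | cons k tl ih =>
    intro ans hans
    simp only [List.foldl_cons]
    exact ih _ (bAnsBody_nodup tset region k _ ans hans)

-- a node with a non-empty adjacency list is a key of the graph
theorem mem_keys_of_mem_nbrs (graph : List (Int × List Int)) (u v : Int)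
    (hv : v ∈ nbrsOf graph u) : u ∈ (PySem.Dict.mk graph).keys := by
  by_cases h : (PySem.Dict.mk graph).contains u = true
  · exact (PySem.Dict.contains_iff_mem_keys _ _).mp h
  · rw [Bool.not_eq_true] at h
    rw [nbrsOf, PySem.Dict.getD_of_not_contains _ [] h] at hv
    cases hv

-- two Nodup lists with the same members have the same Python sorted()
theorem sorted_eq_of_same_mem (xs ys : List String) (hx : xs.Nodup) (hy : ys.Nodup)
    (h : ∀ s, s ∈ xs ↔ s ∈ ys) :
    PySem.List.sorted xs (fun x => x) false = PySem.List.sorted ys (fun x => x) false := by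
  have hperm : xs.Perm ys := (List.perm_ext_iff_of_nodup hx hy).mpr h
  have h1 : (PySem.List.sorted ys (fun x => x) false).Perm xs :=
    (PySem.List.sorted_perm ys _ _).trans hperm.symm
  have h2 : (PySem.List.sorted ys (fun x => x) false).Pairwise (· < ·) := by
    have hle := PySem.List.sorted_pairwise ys (fun x => x)
    have hnd : (PySem.List.sorted ys (fun x => x) false).Nodup :=
      (PySem.List.sorted_perm ys _ _).nodup_iff.mpr hy
    exact (List.Pairwise.and hle hnd).imp (fun hp => lt_of_le_of_ne hp.1 hp.2)
  exact PySem.List.sorted_eq_of_perm_of_pairwise_lt xs _ (fun x => x) h1 h2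

-- ===== VERDICT (by name: the statement is the Claim_ definition above) =====
theorem bfs_from_gateways_spec : Claim_equal_bfs_from_gateways := by
  intro graph targets _
  show bfs_from_gateways graph targets = bfs_from_gateways_alt graph targets
  -- A's side: the loop's answer set holds exactly the edge labels of EdgeSet
  obtain ⟨hq, hd⟩ := init_spec _ rfl targets [] PySem.Dict.empty
  have hd' : ∀ x, (targets.foldl
      (fun (s : List (Int × Int) × PySem.Dict Int (Int × Int)) t =>
        (s.1 ++ [(t, t)], s.2.insert t (0, t))) ([], PySem.Dict.empty)).2.contains x = true ↔
      x ∈ targets := by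
    intro x; rw [hd x]; simp [PySem.Dict.contains_empty]
  have hq' : (targets.foldl
      (fun (s : List (Int × Int) × PySem.Dict Int (Int × Int)) t =>
        (s.1 ++ [(t, t)], s.2.insert t (0, t))) ([], PySem.Dict.empty)).1 =
      targets.map (fun t => (t, t)) := by rw [hq]; simp
  have hInvA : InvA graph targets
      (targets.foldl (fun (s : List (Int × Int) × PySem.Dict Int (Int × Int)) t =>
        (s.1 ++ [(t, t)], s.2.insert t (0, t))) ([], PySem.Dict.empty)).1
      (targets.foldl (fun (s : List (Int × Int) × PySem.Dict Int (Int × Int)) t =>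
        (s.1 ++ [(t, t)], s.2.insert t (0, t))) ([], PySem.Dict.empty)).2
      PySem.Set.empty := by
    refine ⟨?_, ?_, ?_, ?_, ?_, ?_⟩
    · intro t ht; exact (hd' t).mpr ht
    · intro u hu; exact Or.inl ((hd' u).mp hu)
    · intro p hp
      rw [hq'] at hp
      rcases List.mem_map.mp hp with ⟨t, ht, rfl⟩
      exact (hd' t).mpr ht
    · intro u hu
      refine Or.inl ?_
      rw [hq', List.map_map]
      simpa using (hd' u).mp hu
    · intro t ht; simp [PySem.Set.empty] at ht
    · simp [PySem.Set.empty]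
  have hA := loopA_spec graph targets _ _ _ hInvA
  -- B's side: the region is exactly ReachN; the collected labels are exactly EdgeSet
  have hInvB : InvB graph targets PySem.Set.empty (PySem.Set.ofList targets) := by
    refine ⟨?_, ?_, ?_⟩
    · intro x hx; simp [PySem.Set.empty] at hx
    · intro x hx; exact Or.inl ((PySem.Set.mem_ofList _ _).mp hx)
    · intro u hu
      rcases hu with h | h
      · exact Or.inl ((PySem.Set.mem_ofList _ _).mpr h)
      · simp [PySem.Set.empty] at h
  have hreg := regionLoop_spec graph targets PySem.Set.empty (PySem.Set.ofList targets) hInvB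
  have hBmem := bAnsOuter_mem graph targets (PySem.Set.ofList targets)
    (regionLoop graph targets PySem.Set.empty (PySem.Set.ofList targets)) rfl
    ((PySem.Dict.mk graph).keys) PySem.Set.empty
  have hBnd := bAnsOuter_nodup graph (PySem.Set.ofList targets)
    (regionLoop graph targets PySem.Set.empty (PySem.Set.ofList targets))
    ((PySem.Dict.mk graph).keys) PySem.Set.empty (by simp [PySem.Set.empty])
  -- both sides are sorted() of Nodup lists with the same membership
  apply sorted_eq_of_same_mem _ _ hA.2 hBnd
  intro s
  rw [hA.1 s, hBmem s]
  simp only [PySem.Set.empty, List.not_mem_nil, false_or]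
  constructor
  · rintro (⟨t, n, ht, hn, hnt, rfl⟩ | ⟨u, n, hu, hn, hnT, rfl⟩)
    · exact ⟨t, mem_keys_of_mem_nbrs graph t n hn, n, hn, Or.inl ⟨ht, hnt, rfl⟩⟩
    · exact ⟨u, mem_keys_of_mem_nbrs graph u n hn, n, hn, Or.inr ⟨(hreg u).mpr hu, hnT, rfl⟩⟩
  · rintro ⟨node, hk, n, hn, (⟨h1, h2, rfl⟩ | ⟨h1, h2, rfl⟩)⟩
    · exact Or.inl ⟨node, n, h1, hn, h2, rfl⟩
    · exact Or.inr ⟨node, n, (hreg node).mp h1, hn, h2, rfl⟩
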